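-- pv_equiv track=rewrite | github.com/rrburman23/IR_Asgmt1 | evaluate_engine.py | relevance_from_concepts_by_id
-- ===== SOURCE A (Python) =====
-- def relevance_from_concepts_by_id(
--     ranked_ids: list[str],
--     id_to_text: dict[str, str],
--     concepts: list[str],
--     min_hits: int,
-- ) -> list[int]:
--     """Binary relevance: relevant iff >= min_hits concept tokens appear in blob."""
--     concepts_l = [c.lower() for c in concepts]
--     rel: list[int] = []
--     for doc_id in ranked_ids:
--         blob = id_to_text.get(doc_id, "")
--         hits = sum(1 for c in concepts_l if c in blob)
--         rel.append(1 if hits >= min_hits else 0)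
--     return rel
-- ===== SOURCE B (Python) =====
-- def relevance_from_concepts_by_id(
--     ranked_ids: list[str],
--     id_to_text: dict[str, str],
--     concepts: list[str],
--     min_hits: int,
-- ) -> list[int]:
--     """Transposed traversal: fetch each doc's blob once, accumulate per-doc hit
--     counts concept by concept, then threshold the counts in one final pass."""
--     blobs = [id_to_text.get(doc_id, "") for doc_id in ranked_ids]
--     counts = [0] * len(blobs)
--     for c in concepts:
--         cl = c.lower()
--         for i, blob in enumerate(blobs):
--             if cl in blob:
--                 counts[i] += 1
--     return [1 if h >= min_hits else 0 for h in counts]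
-- ===== Notes on version B (the rewrite author's own statement) =====
-- stated objective: alternative
-- what changed: Transposes the loop nesting: B prefetches each document's blob once, builds a per-document hit-count array by iterating concepts in the outer loop, then thresholds the counts in a separate final pass, instead of A's per-document inner sum over a prebuilt lowercased concept list.
import Mathlib
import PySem

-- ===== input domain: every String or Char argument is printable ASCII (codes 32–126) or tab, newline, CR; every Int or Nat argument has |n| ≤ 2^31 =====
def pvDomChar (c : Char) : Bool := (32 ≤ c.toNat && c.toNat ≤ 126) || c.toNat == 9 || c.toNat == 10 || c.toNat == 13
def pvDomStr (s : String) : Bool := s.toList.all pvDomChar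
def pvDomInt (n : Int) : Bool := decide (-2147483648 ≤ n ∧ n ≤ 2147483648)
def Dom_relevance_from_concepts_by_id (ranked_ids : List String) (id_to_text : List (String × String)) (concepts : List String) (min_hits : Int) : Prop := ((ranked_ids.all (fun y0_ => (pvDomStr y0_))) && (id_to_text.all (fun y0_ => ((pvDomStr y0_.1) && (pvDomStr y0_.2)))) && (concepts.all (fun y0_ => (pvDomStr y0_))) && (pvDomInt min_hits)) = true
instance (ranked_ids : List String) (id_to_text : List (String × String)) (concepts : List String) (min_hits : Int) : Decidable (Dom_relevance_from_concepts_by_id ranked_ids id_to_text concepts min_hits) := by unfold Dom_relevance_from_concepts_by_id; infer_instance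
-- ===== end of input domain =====

-- B transposes the loop nesting: it accumulates a per-document hit-count array concept by
-- concept, then thresholds the counts in a separate pass (alternative decomposition, same cost).

-- ===== PORT A =====
def relevance_from_concepts_by_id (ranked_ids : List String) (id_to_text : List (String × String)) (concepts : List String) (min_hits : Int) : List Int :=
  let concepts_l := concepts.map PySem.Str.lower
  ranked_ids.foldl (fun rel doc_id =>
    let blob := (PySem.Dict.mk id_to_text).getD doc_id ""
    let hits : Int := concepts_l.foldl (fun acc c => if PySem.Str.isIn c blob then acc + 1 else acc) 0
    rel ++ [if min_hits ≤ hits then (1 : Int) else 0]) []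

-- ===== PORT B =====
def relevance_from_concepts_by_id_alt (ranked_ids : List String) (id_to_text : List (String × String)) (concepts : List String) (min_hits : Int) : List Int :=
  let blobs := ranked_ids.map (fun doc_id => (PySem.Dict.mk id_to_text).getD doc_id "")
  let counts := concepts.foldl (fun (counts : List Int) c =>
      let cl := PySem.Str.lower c
      (counts.zip blobs).map (fun p =>
        if PySem.Str.isIn cl p.2 then p.1 + 1 else p.1))
    (blobs.map (fun _ => (0 : Int)))
  counts.map (fun h => if min_hits ≤ h then (1 : Int) else 0)

-- ===== PRECONDITION & SPEC =====
def Spec_relevance_from_concepts_by_id (ranked_ids : List String) (id_to_text : List (String × String)) (concepts : List String) (min_hits : Int) (out : List Int) : Prop := out = relevance_from_concepts_by_id_alt ranked_ids id_to_text concepts min_hits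
instance (ranked_ids : List String) (id_to_text : List (String × String)) (concepts : List String) (min_hits : Int) (out : List Int) : Decidable (Spec_relevance_from_concepts_by_id ranked_ids id_to_text concepts min_hits out) := by unfold Spec_relevance_from_concepts_by_id; infer_instance

-- ===== CLAIM (what is proved, stated in full; the proofs are below) =====
def Claim_equal_relevance_from_concepts_by_id : Prop := ∀ (ranked_ids : List String) (id_to_text : List (String × String)) (concepts : List String) (min_hits : Int), Dom_relevance_from_concepts_by_id ranked_ids id_to_text concepts min_hits → Spec_relevance_from_concepts_by_id ranked_ids id_to_text concepts min_hits (relevance_from_concepts_by_id ranked_ids id_to_text concepts min_hits)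

-- ===== LEMMAS AND PROOFS =====

-- B's accumulation loop: starting from a count array that is a map over ranked_ids,
-- folding the concepts adds, per document, the number of concepts hitting it.
theorem pv_zip_map_self {α : Type} (g : α → Int) (l : List α) :
    (l.map g).zip l = l.map (fun d => (g d, d)) := by
  induction l with
  | nil => simp
  | cons x xs ih => simp [ih]

-- B's accumulation loop: starting from a count array that is a map over ranked_ids,
-- folding the concepts adds, per document, the number of concepts hitting it.
theorem pv_counts_fold {α : Type} (ranked_ids : List α) (q : String → α → Bool)
    (cs : List String) (g : α → Int) :
    cs.foldl (fun (counts : List Int) c =>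
        (counts.zip ranked_ids).map (fun p => if q c p.2 then p.1 + 1 else p.1))
      (ranked_ids.map g)
    = ranked_ids.map (fun d => g d + (cs.countP (fun c => q c d) : Int)) := by
  induction cs generalizing g with
  | nil => simp
  | cons c cs ih =>
    simp only [List.foldl_cons]
    rw [pv_zip_map_self, List.map_map]
    have hstep : ranked_ids.map ((fun (p : Int × α) => if q c p.2 then p.1 + 1 else p.1) ∘ fun d => (g d, d))
        = ranked_ids.map (fun d => if q c d then g d + 1 else g d) := by
      apply List.map_congr_left; intro d _; simp [Function.comp]
    rw [hstep, ih]
    apply List.map_congr_left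
    intro d _
    by_cases h : q c d = true
    · simp [h]; ring
    · simp [h]

theorem relevance_eq (ranked_ids : List String) (id_to_text : List (String × String))
    (concepts : List String) (min_hits : Int) :
    relevance_from_concepts_by_id ranked_ids id_to_text concepts min_hits
    = relevance_from_concepts_by_id_alt ranked_ids id_to_text concepts min_hits := by
  unfold relevance_from_concepts_by_id relevance_from_concepts_by_id_alt
  simp only []
  rw [pv_counts_fold (ranked_ids.map (fun doc_id => (PySem.Dict.mk id_to_text).getD doc_id ""))
      (fun c blob => PySem.Str.isIn (PySem.Str.lower c) blob)
      concepts (fun _ => (0 : Int))]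
  rw [PySem.List.foldl_append_singleton_eq_map, List.nil_append, List.map_map, List.map_map]
  apply List.map_congr_left
  intro d _
  simp only [Function.comp]
  rw [PySem.List.foldl_if_add_one, List.countP_map]
  simp [Function.comp_def]

-- ===== VERDICT (by name: the statement is the Claim_ definition above) =====
theorem relevance_from_concepts_by_id_spec : Claim_equal_relevance_from_concepts_by_id := by
  intro ranked_ids id_to_text concepts min_hits _
  unfold Spec_relevance_from_concepts_by_id
  exact relevance_eq ranked_ids id_to_text concepts min_hits
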